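-- pv_equiv track=rewrite | github.com/hdperezn/otu-taxa-foundation | src/otu_taxa/taxonomy_parsing.py | pick_chain
-- ===== SOURCE A (Python) =====
-- from typing import List, Tuple, Optional, Dict, Set
--
-- RANKS: List[str] = ["k", "p", "c", "o", "f", "g", "s"]
--
-- def pick_chain(tokens: List[str]) -> List[Optional[str]]:
--     chain: List[Optional[str]] = []
--     start = 0
--     for r in RANKS:
--         pref = r + ":"
--         found = None
--         for i in range(start, len(tokens)):
--             t = tokens[i]
--             if isinstance(t, str) and t.startswith(pref):
--                 found = (i, t)
--                 break
--         if found is None: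
--             chain.append(None)
--         else:
--             chain.append(found[1])
--             start = found[0] + 1
--     return chain
-- ===== SOURCE B (Python) =====
-- from typing import List, Optional
--
-- RANKS: List[str] = ["k", "p", "c", "o", "f", "g", "s"]
--
-- def pick_chain(tokens: List[str]) -> List[Optional[str]]:
--     # One indexing pre-pass grouping token positions by their 2-char prefix,
--     # then one monotone-cursor sweep over RANKS: O(n + R) instead of a rescan per rank.
--     pos = {}
--     for i, t in enumerate(tokens):
--         if isinstance(t, str):
--             pos.setdefault(t[:2], []).append((i, t))
--     chain: List[Optional[str]] = []
--     cursor = 0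
--     for r in RANKS:
--         found = next((p for p in pos.get(r + ":", []) if p[0] >= cursor), None)
--         if found is None:
--             chain.append(None)
--         else:
--             chain.append(found[1])
--             cursor = found[0] + 1
--     return chain
-- ===== Notes on version B (the rewrite author's own statement) =====
-- stated objective: faster
-- what changed: Replaces the per-rank rescan of the token list with a single pre-pass that groups token positions by their 2-char prefix in a dict, then a monotone-cursor sweep over RANKS reads each group list once.
import Mathlib
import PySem

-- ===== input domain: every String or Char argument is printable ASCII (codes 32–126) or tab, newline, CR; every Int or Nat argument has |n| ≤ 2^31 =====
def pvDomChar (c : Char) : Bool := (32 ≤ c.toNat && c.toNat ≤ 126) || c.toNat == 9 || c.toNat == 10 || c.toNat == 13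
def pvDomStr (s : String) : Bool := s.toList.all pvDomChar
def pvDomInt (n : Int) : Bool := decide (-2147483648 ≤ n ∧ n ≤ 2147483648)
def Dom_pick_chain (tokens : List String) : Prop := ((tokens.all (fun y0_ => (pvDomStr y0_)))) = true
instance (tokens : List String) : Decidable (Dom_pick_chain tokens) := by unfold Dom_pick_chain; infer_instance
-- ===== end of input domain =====

-- B replaces A's per-rank rescan of the token list by one grouping pre-pass (dict keyed by the
-- 2-char prefix) plus a monotone-cursor sweep over RANKS; same return value, fewer scans.

-- ===== PORT A =====
def RANKS : List String := ["k", "p", "c", "o", "f", "g", "s"]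

-- inner loop 'for i in range(start, len(tokens)): … break' of A (isinstance(t, str) is always
-- true under the List String typing)
def pickFindFrom (tokens : List String) (pref : String) (i : Nat) : Option (Nat × String) :=
  if h : i < tokens.length then
    if PySem.Str.startswith tokens[i] pref then some (i, tokens[i])
    else pickFindFrom tokens pref (i + 1)
  else none
termination_by tokens.length - i

def pick_chain (tokens : List String) : List (Option String) :=
  (RANKS.foldl
    (fun (st : List (Option String) × Nat) r =>
      match pickFindFrom tokens (r ++ ":") st.2 with
      | none => (st.1 ++ [none], st.2)
      | some f => (st.1 ++ [some f.2], f.1 + 1))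
    ([], 0)).1

-- ===== PORT B =====
-- 'pos.setdefault(t[:2], []).append((i, t))' for each (i, t) in enumerate(tokens)
def buildPos (tokens : List String) : PySem.Dict String (List (Int × String)) :=
  (PySem.List.enumerate tokens 0).foldl
    (fun pos p =>
      pos.insert (PySem.Str.slice p.2 (some 0) (some 2))
        (pos.getD (PySem.Str.slice p.2 (some 0) (some 2)) [] ++ [p]))
    PySem.Dict.empty

def pick_chain_alt (tokens : List String) : List (Option String) :=
  let pos := buildPos tokens
  (RANKS.foldl
    (fun (st : List (Option String) × Int) r =>
      match (pos.getD (r ++ ":") []).find? (fun p => decide (st.2 ≤ p.1)) with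
      | none => (st.1 ++ [none], st.2)
      | some p => (st.1 ++ [some p.2], p.1 + 1))
    ([], (0 : Int))).1

-- ===== PRECONDITION & SPEC =====
def Spec_pick_chain (tokens : List String) (out : List (Option String)) : Prop := out = pick_chain_alt tokens
instance (tokens : List String) (out : List (Option String)) : Decidable (Spec_pick_chain tokens out) := by unfold Spec_pick_chain; infer_instance

-- ===== CLAIM (what is proved, stated in full; the proofs are below) =====
def Claim_equal_pick_chain : Prop := ∀ (tokens : List String), Dom_pick_chain tokens → Spec_pick_chain tokens (pick_chain tokens)

-- ===== LEMMAS AND PROOFS =====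

-- find? only looks at members, so it respects pointwise-on-members equal predicates
theorem find?_congr_mem {α : Type} {l : List α} {p q : α → Bool}
    (h : ∀ x ∈ l, p x = q x) : l.find? p = l.find? q := by
  induction l with
  | nil => rfl
  | cons x xs ih =>
    simp only [List.find?_cons, h x (List.mem_cons_self)]
    cases q x
    · exact ih fun y hy => h y (List.mem_cons_of_mem x hy)
    · rfl

-- B's grouping pre-pass: looking up k in the built dict yields exactly the tokens whose
-- 2-char prefix is k, in order
theorem getD_buildAux (k : String) : ∀ (l : List (Int × String)) (d : PySem.Dict String (List (Int × String))),
    (l.foldl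
      (fun pos p =>
        pos.insert (PySem.Str.slice p.2 (some 0) (some 2))
          (pos.getD (PySem.Str.slice p.2 (some 0) (some 2)) [] ++ [p])) d).getD k []
    = d.getD k [] ++ l.filter (fun p => PySem.Str.slice p.2 (some 0) (some 2) == k) := by
  intro l
  induction l with
  | nil => intro d; simp
  | cons x xs ih =>
    intro d
    simp only [List.foldl_cons, List.filter_cons, ih]
    by_cases hx : PySem.Str.slice x.2 (some 0) (some 2) = k
    · rw [hx, PySem.Dict.getD_insert_self]
      simp [List.append_assoc]
    · rw [PySem.Dict.getD_insert_of_ne _ _ _ (fun hk => hx hk.symm)]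
      simp [hx]

-- for a 2-character pref, 't[:2] == pref' is exactly 't.startswith(pref)'
theorem slice_two_beq_eq_startswith (t pref : String) (hp : pref.toList.length = 2) :
    (PySem.Str.slice t (some 0) (some 2) == pref) = PySem.Str.startswith t pref := by
  rw [Bool.eq_iff_iff, beq_iff_eq, String.ext_iff]
  have hsl : (PySem.Str.slice t (some 0) (some 2)).toList = t.toList.take 2 := by
    simp [pysem]
  rw [hsl, PySem.Str.startswith_eq, PySem.Chars.startswith_iff,
      List.prefix_iff_eq_take, hp]
  exact ⟨fun h => h.symm, fun h => h.symm⟩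

-- A's scan from index s equals a find? over the enumerated token list restricted to indices ≥ s
theorem scan_eq (tokens : List String) (pref : String) : ∀ (s : Nat),
    (PySem.List.enumerate tokens 0).find?
      (fun p => PySem.Str.startswith p.2 pref && decide ((s : Int) ≤ p.1))
    = (pickFindFrom tokens pref s).map (fun q => ((q.1 : Int), q.2)) := by
  intro s
  induction s using pickFindFrom.induct tokens pref with
  | case1 s h hsw =>
    -- tokens[s] matches: split the enumeration at s
    have henum : PySem.List.enumerate tokens 0
        = PySem.List.enumerate (tokens.take s) 0
          ++ ((s : Int), tokens[s]) :: PySem.List.enumerate (tokens.drop (s + 1)) ((s : Int) + 1) := by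
      conv_lhs => rw [← List.take_append_drop s tokens]
      rw [PySem.List.enumerate_append, List.drop_eq_getElem_cons h, PySem.List.enumerate_cons]
      have hlen : (tokens.take s).length = s := by simp; omega
      rw [hlen]
      norm_num
    rw [henum, List.find?_append]
    have hpre : (PySem.List.enumerate (tokens.take s) 0).find?
        (fun p => PySem.Str.startswith p.2 pref && decide ((s : Int) ≤ p.1)) = none := by
      rw [List.find?_eq_none]
      intro x hx
      rcases (PySem.List.mem_enumerate_iff _ _ _).1 hx with ⟨k, hk, rfl⟩
      have hks : k < s := lt_of_lt_of_le hk (by simp)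
      simp only [Bool.and_eq_true, decide_eq_true_eq]
      rintro ⟨-, hle⟩
      omega
    rw [hpre, Option.none_or, List.find?_cons]
    simp only [hsw]
    rw [pickFindFrom, dif_pos h, if_pos hsw]
    simp
  | case2 s h hsw ih =>
    -- tokens[s] does not match: the bound s can be raised to s+1
    have hcongr : (PySem.List.enumerate tokens 0).find?
        (fun p => PySem.Str.startswith p.2 pref && decide ((s : Int) ≤ p.1))
      = (PySem.List.enumerate tokens 0).find?
        (fun p => PySem.Str.startswith p.2 pref && decide (((s + 1 : Nat) : Int) ≤ p.1)) := by
      apply find?_congr_mem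
      intro x hx
      rcases (PySem.List.mem_enumerate_iff _ _ _).1 hx with ⟨k, hk, rfl⟩
      by_cases hks : k = s
      · subst hks
        have hsw' : PySem.Str.startswith tokens[k] pref = false := by
          cases hb : PySem.Str.startswith tokens[k] pref
          · rfl
          · exact absurd hb hsw
        rw [PySem.Str.startswith_eq] at hsw'
        simp [hsw']
      · have : ((s : Int) ≤ (0 : Int) + (k : Int)) ↔ (((s + 1 : Nat) : Int) ≤ (0 : Int) + (k : Int)) := by
          push_cast; omega
        simp only [decide_eq_decide.mpr this]
    rw [hcongr, ih]
    conv_rhs => rw [pickFindFrom]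
    rw [dif_pos h, if_neg hsw]
  | case3 s h =>
    -- s past the end: nothing to find
    rw [pickFindFrom, dif_neg h]
    simp only [Option.map_none]
    rw [List.find?_eq_none]
    intro x hx
    rcases (PySem.List.mem_enumerate_iff _ _ _).1 hx with ⟨k, hk, rfl⟩
    simp only [Bool.and_eq_true, decide_eq_true_eq]
    rintro ⟨-, hle⟩
    omega

-- one B step reads its group list exactly as A's rescan from the cursor would
theorem step_eq (tokens : List String) (r : String) (hr : (r ++ ":").toList.length = 2) (s : Nat) :
    ((buildPos tokens).getD (r ++ ":") []).find? (fun p => decide ((s : Int) ≤ p.1))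
    = (pickFindFrom tokens (r ++ ":") s).map (fun q => ((q.1 : Int), q.2)) := by
  rw [show (buildPos tokens).getD (r ++ ":") []
      = (PySem.List.enumerate tokens 0).filter
          (fun p => PySem.Str.slice p.2 (some 0) (some 2) == (r ++ ":")) by
    simpa [PySem.Dict.getD_empty] using getD_buildAux (r ++ ":") (PySem.List.enumerate tokens 0) PySem.Dict.empty]
  rw [List.find?_filter, ← scan_eq tokens (r ++ ":") s]
  apply find?_congr_mem
  intro x hx
  rw [← slice_two_beq_eq_startswith x.2 (r ++ ":") hr, Bool.eq_iff_iff]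
  simp

-- the two rank folds agree step by step (the chains coincide, the cursors are the same number)
theorem fold_eq (tokens : List String) : ∀ (rs : List String),
    (∀ r ∈ rs, (r ++ ":").toList.length = 2) → ∀ (chain : List (Option String)) (s : Nat),
    (rs.foldl
      (fun (st : List (Option String) × Nat) r =>
        match pickFindFrom tokens (r ++ ":") st.2 with
        | none => (st.1 ++ [none], st.2)
        | some f => (st.1 ++ [some f.2], f.1 + 1))
      (chain, s)).1
    = (rs.foldl
      (fun (st : List (Option String) × Int) r =>
        match ((buildPos tokens).getD (r ++ ":") []).find? (fun p => decide (st.2 ≤ p.1)) with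
        | none => (st.1 ++ [none], st.2)
        | some p => (st.1 ++ [some p.2], p.1 + 1))
      (chain, (s : Int))).1 := by
  intro rs
  induction rs with
  | nil => intro _ chain s; rfl
  | cons r rs ih =>
    intro hlen chain s
    have hr := hlen r (List.mem_cons_self)
    simp only [List.foldl_cons, step_eq tokens r hr s]
    cases hf : pickFindFrom tokens (r ++ ":") s with
    | none =>
      simp only [Option.map_none]
      exact ih (fun x hx => hlen x (List.mem_cons_of_mem r hx)) (chain ++ [none]) s
    | some f =>
      simp only [Option.map_some]
      have := ih (fun x hx => hlen x (List.mem_cons_of_mem r hx)) (chain ++ [some f.2]) (f.1 + 1)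
      simpa [Int.natCast_add] using this

-- ===== VERDICT (by name: the statement is the Claim_ definition above) =====
theorem pick_chain_spec : Claim_equal_pick_chain := by
  intro tokens _
  unfold Spec_pick_chain pick_chain pick_chain_alt
  exact fold_eq tokens RANKS (by decide) [] 0
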